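-- pv_equiv track=rewrite | github.com/vllm-project/vllm | tests/models/multimodal/test_mapping.py | filter_tied_weights
-- ===== SOURCE A (Python) =====
-- def filter_tied_weights(
--     weight_names: set[str],
--     ref_weight_names: set[str],
--     tied_weight_names: set[str],
-- ) -> set[str]:
--     """
--     Remove tied weights that appear in named_parameters() but not in checkpoint.
--
--     In transformers v5+, tied weights (e.g., lm_head tied to embed_tokens) appear
--     separately in named_parameters() even though only one copy is stored in the
--     checkpoint. _tied_weights_keys stores names relative to submodules, so we
--     match by suffix (e.g., "lm_head.weight" matches "language_model.lm_head.weight").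
--     """
--     if not tied_weight_names:
--         return weight_names
--
--     def is_tied_and_missing(name: str) -> bool:
--         if name in ref_weight_names:
--             return False
--         return any(
--             name == tied or name.endswith(f".{tied}") for tied in tied_weight_names
--         )
--
--     return {name for name in weight_names if not is_tied_and_missing(name)}
-- ===== SOURCE B (Python) =====
-- def filter_tied_weights(
--     weight_names: set[str],
--     ref_weight_names: set[str],
--     tied_weight_names: set[str],
-- ) -> set[str]:
--     # Reverse index: suffix -> names, then one lookup per tied key.
--     if not tied_weight_names:
--         return weight_names
--
--     index = {}
--     for name in weight_names:
--         if name in ref_weight_names: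
--             continue
--         suffixes = [name] + [name[i + 1:] for i, ch in enumerate(name) if ch == '.']
--         for suf in suffixes:
--             index.setdefault(suf, []).append(name)
--
--     removed = set()
--     for tied in tied_weight_names:
--         for name in index.get(tied, ()):
--             removed.add(name)
--
--     return {name for name in weight_names if name not in removed}
-- ===== Notes on version B (the rewrite author's own statement) =====
-- stated objective: faster
-- what changed: Replaces the per-name scan over tied_weight_names (string suffix test each time) by a prebuilt reverse index mapping every dot-boundary suffix of each candidate name to that name, then one dictionary lookup per tied key to collect the removed set.
import Mathlib
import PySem

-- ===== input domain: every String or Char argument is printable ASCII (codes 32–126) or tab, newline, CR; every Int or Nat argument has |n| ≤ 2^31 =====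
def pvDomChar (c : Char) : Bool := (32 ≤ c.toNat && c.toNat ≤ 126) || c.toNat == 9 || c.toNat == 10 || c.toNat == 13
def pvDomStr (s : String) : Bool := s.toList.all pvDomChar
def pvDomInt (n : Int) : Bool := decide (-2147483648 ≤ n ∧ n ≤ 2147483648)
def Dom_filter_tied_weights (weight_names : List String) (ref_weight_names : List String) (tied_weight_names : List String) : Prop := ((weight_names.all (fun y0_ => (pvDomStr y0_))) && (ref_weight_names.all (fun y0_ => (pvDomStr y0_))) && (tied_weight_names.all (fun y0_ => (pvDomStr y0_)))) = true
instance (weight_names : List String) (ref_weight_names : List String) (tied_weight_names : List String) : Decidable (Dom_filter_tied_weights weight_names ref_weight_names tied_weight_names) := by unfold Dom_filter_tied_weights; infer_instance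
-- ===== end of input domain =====

-- B builds a reverse index suffix→names once and looks up each tied key in it, instead of
-- scanning tied_weight_names with a string suffix test for every weight name (measured faster).

-- ===== PORT A =====
-- inner helper `is_tied_and_missing`
def pyIsTiedAndMissing (ref_weight_names tied_weight_names : List String) (name : String) : Bool :=
  if PySem.Set.contains ref_weight_names name then false
  else tied_weight_names.any (fun tied => name == tied || PySem.Str.endswith name ("." ++ tied))

def filter_tied_weights (weight_names : List String) (ref_weight_names : List String) (tied_weight_names : List String) : List String :=
  if tied_weight_names.isEmpty then weight_names
  else weight_names.filter (fun name => !(pyIsTiedAndMissing ref_weight_names tied_weight_names name))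

-- ===== PORT B =====
-- [name] + [name[i+1:] for i, ch in enumerate(name) if ch == '.']
def pySuffixes (name : String) : List String :=
  name :: ((PySem.List.enumerate name.toList).filterMap
    (fun p => if p.2 = '.' then some (PySem.Str.slice name (some (p.1 + 1)) none) else none))

-- index.setdefault(suf, []).append(name) for every suffix of every kept name
def pvBuildIndex (weight_names ref_weight_names : List String) : PySem.Dict String (List String) :=
  weight_names.foldl (fun d name =>
    if PySem.Set.contains ref_weight_names name then d
    else (pySuffixes name).foldl (fun d suf => d.insert suf (d.getD suf [] ++ [name])) d)
    PySem.Dict.empty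

def filter_tied_weights_alt (weight_names : List String) (ref_weight_names : List String) (tied_weight_names : List String) : List String :=
  if tied_weight_names.isEmpty then weight_names
  else
    let index := pvBuildIndex weight_names ref_weight_names
    let removed : PySem.Set String :=
      tied_weight_names.foldl (fun s tied => (index.getD tied []).foldl PySem.Set.add s) PySem.Set.empty
    weight_names.filter (fun name => !(PySem.Set.contains removed name))

-- ===== PRECONDITION & SPEC =====
def Spec_filter_tied_weights (weight_names : List String) (ref_weight_names : List String) (tied_weight_names : List String) (out : List String) : Prop := out = filter_tied_weights_alt weight_names ref_weight_names tied_weight_names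
instance (weight_names : List String) (ref_weight_names : List String) (tied_weight_names : List String) (out : List String) : Decidable (Spec_filter_tied_weights weight_names ref_weight_names tied_weight_names out) := by unfold Spec_filter_tied_weights; infer_instance

-- ===== CLAIM (what is proved, stated in full; the proofs are below) =====
def Claim_equal_filter_tied_weights : Prop := ∀ (weight_names : List String) (ref_weight_names : List String) (tied_weight_names : List String), Dom_filter_tied_weights weight_names ref_weight_names tied_weight_names → Spec_filter_tied_weights weight_names ref_weight_names tied_weight_names (filter_tied_weights weight_names ref_weight_names tied_weight_names)

-- ===== LEMMAS AND PROOFS =====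

-- membership in the removed-set accumulator
theorem mem_foldl_add {s : PySem.Set String} {l : List String} {x : String} :
    x ∈ l.foldl PySem.Set.add s ↔ x ∈ s ∨ x ∈ l := by
  induction l generalizing s with
  | nil => simp
  | cons a l ih => simp [List.foldl_cons, ih, PySem.Set.mem_add]; tauto

-- membership in the index after appending one name under all its suffixes
theorem mem_getD_inner_fold (sufs : List String) (d : PySem.Dict String (List String))
    (n s x : String) :
    x ∈ (sufs.foldl (fun d suf => d.insert suf (d.getD suf [] ++ [n])) d).getD s []
      ↔ x ∈ d.getD s [] ∨ (x = n ∧ s ∈ sufs) := by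
  induction sufs generalizing d with
  | nil => simp
  | cons a sufs ih =>
    simp only [List.foldl_cons, ih, PySem.Dict.getD_insert]
    by_cases h : s = a
    · simp [h]; tauto
    · simp [h]

-- full characterisation of the reverse index (accumulator-generalised)
theorem mem_getD_buildIndex_aux (r : List String) (s x : String) :
    ∀ (w : List String) (d : PySem.Dict String (List String)),
    x ∈ (w.foldl (fun d name =>
        if PySem.Set.contains r name then d
        else (pySuffixes name).foldl (fun d suf => d.insert suf (d.getD suf [] ++ [name])) d) d).getD s []
      ↔ x ∈ d.getD s [] ∨ (x ∈ w ∧ ¬ PySem.Set.contains r x = true ∧ s ∈ pySuffixes x) := by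
  intro w
  induction w with
  | nil => simp
  | cons name rest ih =>
    intro d
    simp only [List.foldl_cons]
    by_cases hr : PySem.Set.contains r name = true
    · rw [if_pos hr, ih]
      constructor
      · rintro (h | ⟨hm, hnr, hs⟩)
        · exact Or.inl h
        · exact Or.inr ⟨List.mem_cons_of_mem _ hm, hnr, hs⟩
      · rintro (h | ⟨hm, hnr, hs⟩)
        · exact Or.inl h
        · rcases List.mem_cons.mp hm with rfl | hm'
          · exact absurd hr hnr
          · exact Or.inr ⟨hm', hnr, hs⟩
    · rw [if_neg hr, ih, mem_getD_inner_fold]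
      constructor
      · rintro ((h | ⟨rfl, hs⟩) | ⟨hm, hnr, hs⟩)
        · exact Or.inl h
        · exact Or.inr ⟨List.mem_cons_self .., hr, hs⟩
        · exact Or.inr ⟨List.mem_cons_of_mem _ hm, hnr, hs⟩
      · rintro (h | ⟨hm, hnr, hs⟩)
        · exact Or.inl (Or.inl h)
        · rcases List.mem_cons.mp hm with rfl | hm'
          · exact Or.inl (Or.inr ⟨rfl, hs⟩)
          · exact Or.inr ⟨hm', hnr, hs⟩

theorem mem_getD_buildIndex (w r : List String) (s x : String) :
    x ∈ (pvBuildIndex w r).getD s []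
      ↔ x ∈ w ∧ ¬ PySem.Set.contains r x = true ∧ s ∈ pySuffixes x := by
  unfold pvBuildIndex
  rw [mem_getD_buildIndex_aux]
  simp

-- String.toList is injective
theorem pv_toList_inj {a b : String} (h : a.toList = b.toList) : a = b := by
  simpa using congrArg String.ofList h

-- the slice name[k+1:] is the char-level drop
theorem pv_toList_slice_drop (name : String) (k : Nat) :
    (PySem.Str.slice name (some ((0:Int)+k+1)) none).toList = name.toList.drop (k+1) := by
  simp only [PySem.Str.toList_slice]
  rw [show ((0:Int)+(k:Int)+1) = ((k+1:Nat):Int) by push_cast; ring]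
  rw [PySem.Chars.slice_eq_listSlice, PySem.List.slice_from_natCast]

-- suffix-list membership matches A's endswith test (suffix form)
theorem mem_pySuffixes (name s : String) :
    s ∈ pySuffixes name ↔ (name = s ∨ ('.' :: s.toList) <:+ name.toList) := by
  unfold pySuffixes
  simp only [List.mem_cons, List.mem_filterMap, PySem.List.mem_enumerate_iff]
  constructor
  · rintro (rfl | ⟨p, ⟨k, hk, rfl⟩, hp⟩)
    · exact Or.inl rfl
    · simp only at hp
      split_ifs at hp with hdot
      · cases hp
        refine Or.inr ?_
        have hdrop : name.toList.drop k = '.' :: name.toList.drop (k+1) := by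
          rw [List.drop_eq_getElem_cons hk, hdot]
        rw [pv_toList_slice_drop, ← hdrop]
        exact List.drop_suffix k name.toList
  · rintro (rfl | ⟨pre, hpre⟩)
    · exact Or.inl rfl
    · have hk : pre.length < name.toList.length := by
        have hlen := congrArg List.length hpre
        simp only [List.length_append, List.length_cons] at hlen
        omega
      refine Or.inr ⟨((0:Int) + pre.length, name.toList[pre.length]), ⟨pre.length, hk, rfl⟩, ?_⟩
      have hdot : name.toList[pre.length] = '.' := by
        have h2 : name.toList[pre.length]? = some '.' := by
          rw [← hpre]; simp
        simpa [List.getElem?_eq_getElem hk] using h2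
      simp only [hdot, if_pos]
      congr 1
      refine (pv_toList_inj ?_).symm
      rw [pv_toList_slice_drop, ← hpre]
      simp [List.drop_append]

-- A's endswith test in suffix form
theorem pv_endswith_iff (name s : String) :
    PySem.Str.endswith name ("." ++ s) = true ↔ ('.' :: s.toList) <:+ name.toList := by
  simp [PySem.Chars.endswith_iff]

-- pointwise agreement of the two filter predicates
theorem pred_agree (w r t : List String) (name : String) (hm : name ∈ w) :
    (!(pyIsTiedAndMissing r t name))
      = !(PySem.Set.contains
          (t.foldl (fun s tied => ((pvBuildIndex w r).getD tied []).foldl PySem.Set.add s) PySem.Set.empty)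
          name) := by
  congr 1
  rw [Bool.eq_iff_iff, PySem.Set.contains_iff]
  have hmem : ∀ (acc : PySem.Set String),
      name ∈ t.foldl (fun s tied => ((pvBuildIndex w r).getD tied []).foldl PySem.Set.add s) acc
        ↔ name ∈ acc ∨ ∃ tied ∈ t, name ∈ (pvBuildIndex w r).getD tied [] := by
    intro acc
    induction t generalizing acc with
    | nil => simp
    | cons a t ih => rw [List.foldl_cons, ih, mem_foldl_add]; simp; tauto
  rw [hmem]
  unfold pyIsTiedAndMissing
  by_cases hr : PySem.Set.contains r name = true
  · simp only [if_pos hr]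
    simp only [PySem.Set.empty, List.not_mem_nil, false_or]
    constructor
    · intro h; cases h
    · rintro ⟨tied, _, hmemI⟩
      rw [mem_getD_buildIndex] at hmemI
      exact absurd hr hmemI.2.1
  · simp only [if_neg hr]
    simp only [PySem.Set.empty, List.not_mem_nil, false_or, List.any_eq_true,
      Bool.or_eq_true, beq_iff_eq]
    constructor
    · rintro ⟨tied, ht, hor⟩
      refine ⟨tied, ht, ?_⟩
      rw [mem_getD_buildIndex, mem_pySuffixes]
      refine ⟨hm, hr, ?_⟩
      rcases hor with h | h
      · exact Or.inl h
      · exact Or.inr ((pv_endswith_iff name tied).mp h)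
    · rintro ⟨tied, ht, hmemI⟩
      rw [mem_getD_buildIndex, mem_pySuffixes] at hmemI
      refine ⟨tied, ht, ?_⟩
      rcases hmemI.2.2 with h | h
      · exact Or.inl h
      · exact Or.inr ((pv_endswith_iff name tied).mpr h)

-- ===== VERDICT (by name: the statement is the Claim_ definition above) =====
theorem filter_tied_weights_spec : Claim_equal_filter_tied_weights := by
  intro w r t _
  unfold Spec_filter_tied_weights filter_tied_weights filter_tied_weights_alt
  by_cases h : t.isEmpty
  · simp [h]
  · simp only [if_neg h]
    exact List.filter_congr (fun name hm => pred_agree w r t name hm)
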